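-- pv_equiv track=rewrite | github.com/RavinderSinghPB/Data-Structure-And-Algorithm-Python | list/027 Equilibrium Point(Naive Method).py | checkEquilibrium
-- ===== SOURCE A (Python) =====
-- def checkEquilibrium(arr, n):
--
--     for i in range(0, n):
--
--         l_sum = 0
--         r_sum = 0
--
--         for j in range(0, i):
--             l_sum += arr[j]
--
--         for j in range(i + 1, n):
--             r_sum += arr[j]
--
--         if l_sum == r_sum:
--             return True
--
--     return False
-- ===== SOURCE B (Python) =====
-- def checkEquilibrium(arr, n):
--     if n <= 0:
--         return False
--     prefix = arr[:n]
--     total = sum(prefix)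
--     left = 0
--     for x in prefix:
--         if left == total - left - x:
--             return True
--         left += x
--     return False
-- ===== Notes on version B (the rewrite author's own statement) =====
-- stated objective: faster
-- what changed: Replaced the nested re-summation of both sides for every index by one precomputed prefix total and a single pass with a running left sum.
-- intended difference: On arr=[] with n=1 (the only input where the claimed length exceeds the real length without A raising) A returns True because both inner loops are empty, while B returns False; an empty list has no element that could be an equilibrium point, so False is the intended value. — e.g. on checkEquilibrium([], 1): A returns true, B returns false
import Mathlib
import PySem

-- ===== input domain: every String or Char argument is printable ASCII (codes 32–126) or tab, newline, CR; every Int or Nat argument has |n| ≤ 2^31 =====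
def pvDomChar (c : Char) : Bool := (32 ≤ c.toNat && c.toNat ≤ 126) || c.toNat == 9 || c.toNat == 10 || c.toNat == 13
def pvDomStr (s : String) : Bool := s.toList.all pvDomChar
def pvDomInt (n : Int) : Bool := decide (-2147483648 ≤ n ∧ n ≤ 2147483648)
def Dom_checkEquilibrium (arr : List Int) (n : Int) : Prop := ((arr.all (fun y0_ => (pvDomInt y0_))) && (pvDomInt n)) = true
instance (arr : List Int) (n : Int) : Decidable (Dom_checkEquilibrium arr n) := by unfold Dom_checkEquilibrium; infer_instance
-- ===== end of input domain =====

-- B replaces A's O(n^2) nested re-summation by a precomputed total and one pass with a running left sum (measured asymptotically faster).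


-- ===== PORT A =====
-- outer 'for i in range(0, n)' with early 'return True'
def aLoop (arr : List Int) (n : Int) : List Int → Bool
  | [] => false
  | i :: rest =>
    let l_sum := (PySem.List.pyRange 0 i 1).foldl (fun s j => s + PySem.List.pyGetD arr j 0) 0
    let r_sum := (PySem.List.pyRange (i + 1) n 1).foldl (fun s j => s + PySem.List.pyGetD arr j 0) 0
    if l_sum == r_sum then true else aLoop arr n rest

def checkEquilibrium (arr : List Int) (n : Int) : Bool :=
  aLoop arr n (PySem.List.pyRange 0 n 1)

-- ===== PORT B =====
-- 'for x in prefix' with running left sum and early 'return True'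
def bLoop (total : Int) : Int → List Int → Bool
  | _, [] => false
  | left, x :: rest => if left == total - left - x then true else bLoop total (left + x) rest

def checkEquilibrium_alt (arr : List Int) (n : Int) : Bool :=
  if n ≤ 0 then false
  else
    let pref := PySem.List.slice arr none (some n)
    bLoop pref.sum 0 pref

-- ===== PRECONDITION & SPEC =====
-- Pre_ is exactly the inputs on which A returns without raising: A raises IndexError whenever
-- n exceeds the real length, except the single degenerate shape arr = [] , n = 1 (both inner loops empty).
def Pre_checkEquilibrium (arr : List Int) (n : Int) : Prop :=
  n ≤ (arr.length : Int) ∨ (arr = [] ∧ n = 1)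
instance (arr : List Int) (n : Int) : Decidable (Pre_checkEquilibrium arr n) := by
  unfold Pre_checkEquilibrium; infer_instance

def pvWitness_checkEquilibrium : List Int × Int := ([1, 3, 5, 2, 2], 5)

-- On arr = [] with n = 1 (the only non-raising input whose claimed length exceeds the real length)
-- A returns True because both inner loops are empty, while B returns False; an empty list has no
-- element that could be an equilibrium point, so False is the intended value.
def D_checkEquilibrium (arr : List Int) (n : Int) : Prop := arr = [] ∧ n = 1
instance (arr : List Int) (n : Int) : Decidable (D_checkEquilibrium arr n) := by
  unfold D_checkEquilibrium; infer_instance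

def Spec_checkEquilibrium (arr : List Int) (n : Int) (out : Bool) : Prop :=
  ¬ D_checkEquilibrium arr n → out = checkEquilibrium_alt arr n
instance (arr : List Int) (n : Int) (out : Bool) : Decidable (Spec_checkEquilibrium arr n out) := by
  unfold Spec_checkEquilibrium; infer_instance

def pvDiffWitness_checkEquilibrium : List Int × Int := ([], 1)
def pvDiffWitnessOut_checkEquilibrium : Bool × Bool := (true, false)

-- ===== CLAIM (what is proved, stated in full; the proofs are below) =====
def Claim_unchanged_checkEquilibrium : Prop := ∀ (arr : List Int) (n : Int), Dom_checkEquilibrium arr n → Pre_checkEquilibrium arr n → Spec_checkEquilibrium arr n (checkEquilibrium arr n)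
def Claim_changed_checkEquilibrium : Prop := Dom_checkEquilibrium (pvDiffWitness_checkEquilibrium.1) (pvDiffWitness_checkEquilibrium.2) ∧ Pre_checkEquilibrium (pvDiffWitness_checkEquilibrium.1) (pvDiffWitness_checkEquilibrium.2) ∧ D_checkEquilibrium (pvDiffWitness_checkEquilibrium.1) (pvDiffWitness_checkEquilibrium.2) ∧ checkEquilibrium (pvDiffWitness_checkEquilibrium.1) (pvDiffWitness_checkEquilibrium.2) = pvDiffWitnessOut_checkEquilibrium.1 ∧ checkEquilibrium_alt (pvDiffWitness_checkEquilibrium.1) (pvDiffWitness_checkEquilibrium.2) = pvDiffWitnessOut_checkEquilibrium.2 ∧ pvDiffWitnessOut_checkEquilibrium.1 ≠ pvDiffWitnessOut_checkEquilibrium.2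
def Claim_exact_checkEquilibrium : Prop := ∀ (arr : List Int) (n : Int), Dom_checkEquilibrium arr n → Pre_checkEquilibrium arr n → D_checkEquilibrium arr n → checkEquilibrium arr n ≠ checkEquilibrium_alt arr n

-- ===== LEMMAS AND PROOFS =====

-- 'any' respects pointwise-equal predicates on the list's members
lemma pvAnyCongrMem {α : Type} {l : List α} {p q : α → Bool}
    (h : ∀ a ∈ l, p a = q a) : l.any p = l.any q := by
  induction l with
  | nil => rfl
  | cons x t ih =>
    simp only [List.any_cons, h x (List.mem_cons_self), ih (fun a ha => h a (List.mem_cons_of_mem x ha))]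

-- A's outer loop is an 'any' over its index list
lemma aLoop_eq_any (arr : List Int) (n : Int) (l : List Int) :
    aLoop arr n l = l.any (fun i =>
      ((PySem.List.pyRange 0 i 1).foldl (fun s j => s + PySem.List.pyGetD arr j 0) 0) ==
      ((PySem.List.pyRange (i + 1) n 1).foldl (fun s j => s + PySem.List.pyGetD arr j 0) 0)) := by
  induction l with
  | nil => rfl
  | cons i rest ih =>
    simp only [aLoop, List.any_cons, ih]
    by_cases h :
      ((PySem.List.pyRange 0 i 1).foldl (fun s j => s + PySem.List.pyGetD arr j 0) 0) ==
      ((PySem.List.pyRange (i + 1) n 1).foldl (fun s j => s + PySem.List.pyGetD arr j 0) 0)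
    · simp [h]
    · simp [h]

-- B's loop with running left sum, characterised by index
lemma bLoop_spec (total : Int) (l : List Int) : ∀ left : Int,
    bLoop total left l = (List.range l.length).any
      (fun k => (left + (l.take k).sum) == (total - (left + (l.take k).sum) - l.getD k 0)) := by
  induction l with
  | nil => intro left; rfl
  | cons x rest ih =>
    intro left
    simp only [bLoop, List.length_cons, List.range_succ_eq_map, List.any_cons, List.any_map]
    by_cases h : left == total - left - x
    · simp [h, List.take_zero]
    · simp only [h]
      rw [ih (left + x)]
      simp only [List.take_zero, List.sum_nil, Int.add_zero, List.getD_cons_zero, h,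
        Bool.false_or]
      apply pvAnyCongrMem
      intro k _
      simp only [Function.comp_apply, List.take_succ_cons, List.sum_cons, List.getD_cons_succ]
      congr 1 <;> ring_nf

-- sum of arr[a:b] computed through pyGetD over a range
lemma sumRange (arr : List Int) (a b : Nat) (hb : b ≤ arr.length) :
    ((PySem.List.pyRange (a : Int) (b : Int) 1).map (fun j => PySem.List.pyGetD arr j 0)).sum
      = ((arr.take b).drop a).sum := by
  induction b with
  | zero =>
    rw [PySem.List.pyRange_one_eq_nil (by exact_mod_cast Nat.zero_le a)]
    simp
  | succ b ih =>
    have hb' : b ≤ arr.length := Nat.le_of_succ_le hb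
    by_cases hab : a ≤ b
    · have hsplit : PySem.List.pyRange (a : Int) ((b : Nat) + 1 : Nat) 1
          = PySem.List.pyRange (a : Int) (b : Int) 1 ++ [(b : Int)] := by
        push_cast
        exact PySem.List.pyRange_one_succ_right (by exact_mod_cast hab)
      rw [hsplit, List.map_append, List.sum_append, ih hb']
      have hblt : b < arr.length := hb
      have hget : PySem.List.pyGetD arr (b : Int) 0 = arr[b] := by
        rw [PySem.List.pyGetD_natCast]
        simp [List.getD, hblt]
      have htake : arr.take (b + 1) = arr.take b ++ [arr[b]] := by
        rw [List.take_add_one]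
        simp [hblt]
      rw [htake, List.drop_append_of_le_length
          (show a ≤ (arr.take b).length by rw [List.length_take]; omega),
        List.sum_append]
      simp [hget]
    · have : ((b : Nat) + 1 : Nat) ≤ (a : Int) := by exact_mod_cast Nat.succ_le_of_lt (Nat.lt_of_not_le hab)
      rw [PySem.List.pyRange_one_eq_nil this]
      have : ((arr.take (b + 1)).drop a) = [] := by
        apply List.drop_eq_nil_of_le
        calc (arr.take (b + 1)).length ≤ b + 1 := by simp
          _ ≤ a := Nat.succ_le_of_lt (Nat.lt_of_not_le hab)
      simp [this]

-- splitting a sum at an index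
lemma sum_split (ys : List Int) (k : Nat) (hk : k < ys.length) :
    ys.sum = (ys.take k).sum + ys.getD k 0 + (ys.drop (k + 1)).sum := by
  conv_lhs => rw [← List.take_append_drop k ys]
  rw [List.sum_append, List.drop_eq_getElem_cons hk, List.sum_cons]
  simp only [List.getD, List.getElem?_eq_getElem hk, Option.getD_some]
  ring

theorem checkEquilibrium_spec : Claim_unchanged_checkEquilibrium := by
  intro arr n _ hpre hD
  by_cases hn : n ≤ 0
  · -- both sides trivially false
    unfold checkEquilibrium checkEquilibrium_alt
    rw [PySem.List.pyRange_one_eq_nil hn, if_pos hn]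
    rfl
  · rw [Int.not_le] at hn
    have hlen : n ≤ (arr.length : Int) := by
      rcases hpre with h | ⟨ha, hn1⟩
      · exact h
      · exact absurd ⟨ha, hn1⟩ hD
    -- n = m as a natural number, 0 < m ≤ arr.length
    obtain ⟨m, rfl⟩ : ∃ m : Nat, n = (m : Int) :=
      ⟨n.toNat, (Int.toNat_of_nonneg (le_of_lt hn)).symm⟩
    have hm : m ≤ arr.length := by exact_mod_cast hlen
    have hm0 : 0 < m := by exact_mod_cast hn
    set ys := arr.take m with hys
    have hyslen : ys.length = m := by simp [hys, hm]
    -- B side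
    unfold checkEquilibrium_alt
    rw [if_neg (by omega), PySem.List.slice_to_natCast]
    -- A side
    unfold checkEquilibrium
    rw [aLoop_eq_any, bLoop_spec, hyslen, ← hys]
    rw [PySem.List.pyRange_one (a := 0) (b := (m : Int))]
    simp only [Int.sub_zero, Int.toNat_natCast, List.any_map, Int.zero_add]
    apply pvAnyCongrMem
    intro k hk
    have hkm : k < m := List.mem_range.mp hk
    have hkys : k < ys.length := by omega
    simp only [Function.comp_apply]
    -- left sum = (ys.take k).sum
    have hl : ((PySem.List.pyRange 0 ((k : Nat) : Int) 1).foldl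
        (fun s j => s + PySem.List.pyGetD arr j 0) 0) = (ys.take k).sum := by
      rw [PySem.List.foldl_add]
      have := sumRange arr 0 k (by omega)
      simp only [Nat.cast_zero, List.drop_zero] at this
      rw [this]
      simp [hys, List.take_take, Nat.min_eq_left (le_of_lt hkm)]
    -- right sum = (ys.drop (k+1)).sum
    have hr : ((PySem.List.pyRange ((k : Int) + 1) (m : Int) 1).foldl
        (fun s j => s + PySem.List.pyGetD arr j 0) 0) = (ys.drop (k + 1)).sum := by
      rw [PySem.List.foldl_add]
      have h0 : ((k : Int) + 1) = (((k + 1 : Nat)) : Int) := by push_cast; ring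
      rw [h0]
      rw [sumRange arr (k + 1) m hm, hys]
      omega
    rw [hl, hr]
    have hsplit := sum_split ys k hkys
    -- the two boolean conditions are propositionally equal
    have : ((ys.take k).sum = (ys.drop (k + 1)).sum)
        ↔ ((ys.take k).sum = ys.sum - (ys.take k).sum - ys.getD k 0) := by omega
    rw [Bool.eq_iff_iff]
    simp only [beq_iff_eq]
    exact this

theorem checkEquilibrium_changed : Claim_changed_checkEquilibrium := by
  unfold Claim_changed_checkEquilibrium; decide

theorem checkEquilibrium_tight : Claim_exact_checkEquilibrium := by
  intro arr n _ _ hD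
  obtain ⟨rfl, rfl⟩ := hD
  decide
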